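-- pv_equiv track=rewrite | github.com/fihtony/constellation | scripts/extract_figma_design.py | parse_figma_url
-- ===== SOURCE A (Python) =====
-- def parse_figma_url(url: str) -> tuple:
--     """Parse Figma URL to extract file key and node ID.
--
--     Args:
--         url: Figma file URL
--
--     Returns:
--         Tuple of (file_key, node_id)
--     """
--     file_key = ""
--     node_id = ""
--
--     # Extract file key
--     for prefix in ("/design/", "/file/"):
--         if prefix in url:
--             after = url.split(prefix)[1]
--             file_key = after.split("/")[0].split("?")[0]
--             break
--
--     # Extract node ID
--     if "node-id=" in url:
--         raw = url.split("node-id=")[1].split("&")[0]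
--         node_id = raw.replace("-", ":").replace("%3A", ":").replace("%3a", ":")
--
--     return file_key, node_id
-- ===== SOURCE B (Python) =====
-- def parse_figma_url(url: str) -> tuple:
--     """Parse Figma URL to extract file key and node ID (find/slice scan instead of split chains)."""
--
--     def tail_after(marker):
--         i = url.find(marker)
--         if i == -1:
--             return None
--         return url[i + len(marker):]
--
--     def take_until(stops, s):
--         out = []
--         for c in s:
--             if c in stops:
--                 break
--             out.append(c)
--         return "".join(out)
--
--     tail = tail_after("/design/")
--     if tail is None:
--         tail = tail_after("/file/")
--     file_key = take_until("/?", tail) if tail is not None else ""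
--
--     node_id = ""
--     tail = tail_after("node-id=")
--     if tail is not None:
--         s = take_until("&", tail)
--         out = []
--         i = 0
--         n = len(s)
--         while i < n:
--             c = s[i]
--             if c == '-':
--                 out.append(':')
--                 i += 1
--             elif s[i:i + 3] in ("%3A", "%3a"):
--                 out.append(':')
--                 i += 3
--             else:
--                 out.append(c)
--                 i += 1
--         node_id = "".join(out)
--     return file_key, node_id
-- ===== Notes on version B (the rewrite author's own statement) =====
-- stated objective: alternative
-- what changed: Replaces A's repeated str.split chains (which build whole piece-lists for each marker) with a single find/slice per marker followed by one explicit character scan per field, and fuses A's three sequential .replace passes into one left-to-right scan that rewrites '-', '%3A' and '%3a' in a single traversal.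
-- outside the precondition, e.g. on parse_figma_url('node-id=1node-id=2'): A returns ('', '1'), B returns ('', '1node:id=2')
import Mathlib
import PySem

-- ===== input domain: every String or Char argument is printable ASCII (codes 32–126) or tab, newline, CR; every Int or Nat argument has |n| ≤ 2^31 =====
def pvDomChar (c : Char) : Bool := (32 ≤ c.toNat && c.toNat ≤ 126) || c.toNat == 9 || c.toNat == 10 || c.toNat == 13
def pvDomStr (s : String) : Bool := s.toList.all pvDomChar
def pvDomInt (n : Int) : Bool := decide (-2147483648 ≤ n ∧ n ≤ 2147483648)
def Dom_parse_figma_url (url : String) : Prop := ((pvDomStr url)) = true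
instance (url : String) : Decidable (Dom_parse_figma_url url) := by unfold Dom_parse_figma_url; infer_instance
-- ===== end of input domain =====

-- B re-implements the split-chain parser with find/slice and two explicit character
-- scans (objective: alternative — one forward pass per field instead of building split lists).

-- ===== PORT A =====
-- s.split(sep)[i] : exact at every use site (each is guarded by `sep in s`, so the list is long enough)
def pvSplitIdx (s sep : String) (i : Nat) : String :=
  ((PySem.Str.split? s sep).getD []).getD i ""

-- the `for prefix in (…): if prefix in url: …; break` loop
def pvFileKeyLoop (url : String) : List String → String
  | [] => ""
  | p :: rest =>
    if PySem.Str.isIn p url then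
      pvSplitIdx (pvSplitIdx (pvSplitIdx url p 1) "/" 0) "?" 0
    else pvFileKeyLoop url rest

def parse_figma_url (url : String) : String × String :=
  let file_key := pvFileKeyLoop url ["/design/", "/file/"]
  let node_id :=
    if PySem.Str.isIn "node-id=" url then
      let raw := pvSplitIdx (pvSplitIdx url "node-id=" 1) "&" 0
      PySem.Str.replace (PySem.Str.replace (PySem.Str.replace raw "-" ":") "%3A" ":") "%3a" ":"
    else ""
  (file_key, node_id)

-- ===== PORT B =====
-- Source B's tail_after: the suffix of `url` after the first occurrence of `marker`, if any
def pvTailAfter (url marker : String) : Option String :=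
  let i := PySem.Str.find url marker
  if i = -1 then none
  else some (PySem.Str.slice url (some (i + PySem.Str.len marker)) none)

-- Source B's take_until: the for/break/append loop
def pvTakeUntil (stops : List Char) : List Char → List Char
  | [] => []
  | c :: t => if c ∈ stops then [] else c :: pvTakeUntil stops t

-- Source B's while-loop over index i (recursion on the remaining characters; s[i:i+3] is `take 3`)
def pvScan (s : List Char) : List Char :=
  match s with
  | [] => []
  | c :: t =>
    if c = '-' then ':' :: pvScan t
    else if (c :: t).take 3 = ['%', '3', 'A'] ∨ (c :: t).take 3 = ['%', '3', 'a'] then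
      ':' :: pvScan (t.drop 2)
    else c :: pvScan t
  termination_by s.length
  decreasing_by
  all_goals simp

def parse_figma_url_alt (url : String) : String × String :=
  let tail :=
    match pvTailAfter url "/design/" with
    | some t => some t
    | none => pvTailAfter url "/file/"
  let file_key :=
    match tail with
    | some t => String.ofList (pvTakeUntil ['/', '?'] t.toList)
    | none => ""
  let node_id :=
    match pvTailAfter url "node-id=" with
    | some t => String.ofList (pvScan (pvTakeUntil ['&'] t.toList))
    | none => ""
  (file_key, node_id)

-- ===== PRECONDITION & SPEC =====
-- Pre_ excludes URLs in which "node-id=" occurs more than once: there A's split-chain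
-- truncates the node id at the accidental second marker, a corner no caller specifies.
def Pre_parse_figma_url (url : String) : Prop := PySem.Str.count url "node-id=" ≤ 1
instance (url : String) : Decidable (Pre_parse_figma_url url) := by unfold Pre_parse_figma_url; infer_instance

def pvWitness_parse_figma_url : String := "https://www.figma.com/design/aBcKey/My-File?node-id=12-34&t=xyz"

def Spec_parse_figma_url (url : String) (out : String × String) : Prop := out = parse_figma_url_alt url
instance (url : String) (out : String × String) : Decidable (Spec_parse_figma_url url out) := by unfold Spec_parse_figma_url; infer_instance

-- ===== CLAIM (what is proved, stated in full; the proofs are below) =====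
def Claim_equal_parse_figma_url : Prop := ∀ (url : String), Dom_parse_figma_url url → Pre_parse_figma_url url → Spec_parse_figma_url url (parse_figma_url url)

-- ===== LEMMAS AND PROOFS =====

-- reference structural recursions for CPython's fuel-style split / count / replace loops
def pvConsHead (c : Char) : List (List Char) → List (List Char)
  | [] => [[c]]
  | h :: r => (c :: h) :: r

def pvPrependHead (p : List Char) : List (List Char) → List (List Char)
  | [] => [p]
  | h :: r => (p ++ h) :: r

def pvSplitRec (sep : List Char) (s : List Char) : List (List Char) :=
  if h : sep ≠ [] ∧ sep.isPrefixOf s ∧ s ≠ [] then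
    [] :: pvSplitRec sep (s.drop sep.length)
  else
    match s with
    | [] => [[]]
    | c :: t => pvConsHead c (pvSplitRec sep t)
  termination_by s.length
  decreasing_by
  · have h1 : sep.length ≠ 0 := by simpa using h.1
    cases s with
    | nil => exact absurd rfl h.2.2
    | cons a t => simp [List.length_drop]; omega
  · simp

def pvCountRec (sep : List Char) (s : List Char) : Nat :=
  if h : sep ≠ [] ∧ sep.isPrefixOf s ∧ s ≠ [] then
    pvCountRec sep (s.drop sep.length) + 1
  else
    match s with
    | [] => 0
    | c :: t => pvCountRec sep t
  termination_by s.length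
  decreasing_by
  · have h1 : sep.length ≠ 0 := by simpa using h.1
    cases s with
    | nil => exact absurd rfl h.2.2
    | cons a t => simp [List.length_drop]; omega
  · simp

def pvRepRec (old new : List Char) (s : List Char) : List Char :=
  if h : old ≠ [] ∧ old.isPrefixOf s ∧ s ≠ [] then
    new ++ pvRepRec old new (s.drop old.length)
  else
    match s with
    | [] => []
    | c :: t => c :: pvRepRec old new t
  termination_by s.length
  decreasing_by
  · have h1 : old.length ≠ 0 := by simpa using h.1
    cases s with
    | nil => exact absurd rfl h.2.2
    | cons a t => simp [List.length_drop]; omega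
  · simp

def pvTakeUntilSub (sep : List Char) : List Char → List Char
  | [] => []
  | c :: t => if sep.isPrefixOf (c :: t) then [] else c :: pvTakeUntilSub sep t

-- == the fuel loops compute the structural recursions ==

lemma pvSplitRec_ne_nil' (sep s : List Char) : pvSplitRec sep s ≠ [] := by
  rw [pvSplitRec]
  split
  · simp
  · cases s with
    | nil => simp
    | cons c t => cases h : pvSplitRec sep t <;> simp [pvConsHead, h]

lemma pvSplitOn_go_spec (sep : List Char) (hsep : sep ≠ []) :
    ∀ (fuel : Nat) (s cur : List Char) (acc : List (List Char)), s.length ≤ fuel →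
      PySem.Chars.splitOn.go sep fuel s cur acc
        = acc.reverse ++ pvPrependHead cur.reverse (pvSplitRec sep s) := by
  have hs1 : 1 ≤ sep.length := by
    cases sep with
    | nil => exact absurd rfl hsep
    | cons a t => simp
  intro fuel
  induction fuel with
  | zero =>
    intro s cur acc h
    have hs : s = [] := List.length_eq_zero_iff.mp (Nat.le_zero.mp h)
    subst hs
    rw [PySem.Chars.splitOn.go, pvSplitRec]
    simp [pvPrependHead, hsep]
  | succ n ih =>
    intro s cur acc h
    cases s with
    | nil =>
      rw [PySem.Chars.splitOn.go, pvSplitRec]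
      simp [pvPrependHead, hsep]
      omega
    | cons c t =>
      rw [PySem.Chars.splitOn.go]
      simp only [List.length_cons] at h
      by_cases hp : sep.isPrefixOf (c :: t)
      · rw [if_pos hp]
        rw [ih _ _ _ (by simp [List.length_drop]; omega)]
        conv_rhs => rw [pvSplitRec]
        rw [dif_pos ⟨hsep, hp, by simp⟩]
        cases hrec : pvSplitRec sep ((c :: t).drop sep.length) with
        | nil => exact absurd hrec (pvSplitRec_ne_nil' _ _)
        | cons hh rr => simp [pvPrependHead]
      · rw [if_neg hp]
        rw [ih _ _ _ (by omega)]
        conv_rhs => rw [pvSplitRec]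
        rw [dif_neg (by simp [hp])]
        cases hrec : pvSplitRec sep t with
        | nil => exact absurd hrec (pvSplitRec_ne_nil' _ _)
        | cons hh rr => simp [pvPrependHead, pvConsHead, hrec]

lemma pvSplitOn_eq (sep s : List Char) (hsep : sep ≠ []) :
    PySem.Chars.splitOn s sep = pvSplitRec sep s := by
  rw [PySem.Chars.splitOn, pvSplitOn_go_spec sep hsep _ _ _ _ (by omega)]
  cases hrec : pvSplitRec sep s with
  | nil => exact absurd hrec (pvSplitRec_ne_nil' sep s)
  | cons hh rr => simp [pvPrependHead]

lemma pvCount_go_spec (sep : List Char) (hsep : sep ≠ []) :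
    ∀ (fuel : Nat) (s : List Char) (acc : Nat), s.length ≤ fuel →
      PySem.Chars.count.go sep fuel s acc = acc + pvCountRec sep s := by
  have hs1 : 1 ≤ sep.length := by
    cases sep with
    | nil => exact absurd rfl hsep
    | cons a t => simp
  intro fuel
  induction fuel with
  | zero =>
    intro s acc h
    have hs : s = [] := List.length_eq_zero_iff.mp (Nat.le_zero.mp h)
    subst hs
    rw [PySem.Chars.count.go, pvCountRec]
    simp [hsep]
  | succ n ih =>
    intro s acc h
    cases s with
    | nil =>
      rw [PySem.Chars.count.go, pvCountRec]
      simp [hsep]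
      omega
    | cons c t =>
      rw [PySem.Chars.count.go]
      simp only [List.length_cons] at h
      by_cases hp : sep.isPrefixOf (c :: t)
      · rw [if_pos hp]
        rw [ih _ _ (by simp [List.length_drop]; omega)]
        conv_rhs => rw [pvCountRec]
        rw [dif_pos ⟨hsep, hp, by simp⟩]
        omega
      · rw [if_neg hp]
        rw [ih _ _ (by omega)]
        conv_rhs => rw [pvCountRec]
        rw [dif_neg (by simp [hp])]

lemma pvCount_eq (sep s : List Char) (hsep : sep ≠ []) :
    PySem.Chars.count s sep = pvCountRec sep s := by
  rw [PySem.Chars.count]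
  rw [if_neg (by simp [hsep])]
  rw [pvCount_go_spec sep hsep _ _ _ (by omega)]
  omega

lemma pvReplace_go_spec (old new : List Char) (hold : old ≠ []) :
    ∀ (fuel : Nat) (s acc : List Char), s.length ≤ fuel →
      PySem.Chars.replace.go old new fuel s acc = acc.reverse ++ pvRepRec old new s := by
  have hs1 : 1 ≤ old.length := by
    cases old with
    | nil => exact absurd rfl hold
    | cons a t => simp
  intro fuel
  induction fuel with
  | zero =>
    intro s acc h
    have hs : s = [] := List.length_eq_zero_iff.mp (Nat.le_zero.mp h)
    subst hs
    rw [PySem.Chars.replace.go, pvRepRec]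
    simp [hold]
  | succ n ih =>
    intro s acc h
    cases s with
    | nil =>
      rw [PySem.Chars.replace.go, pvRepRec]
      simp [hold]
      omega
    | cons c t =>
      rw [PySem.Chars.replace.go]
      simp only [List.length_cons] at h
      by_cases hp : old.isPrefixOf (c :: t)
      · rw [if_pos hp]
        rw [ih _ _ (by simp [List.length_drop]; omega)]
        conv_rhs => rw [pvRepRec]
        rw [dif_pos ⟨hold, hp, by simp⟩]
        simp
      · rw [if_neg hp]
        rw [ih _ _ (by omega)]
        conv_rhs => rw [pvRepRec]
        rw [dif_neg (by simp [hp])]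
        simp

lemma pvReplace_eq (s old new : List Char) (hold : old ≠ []) :
    PySem.Chars.replace s old new = pvRepRec old new s := by
  rw [PySem.Chars.replace]
  rw [if_neg (by simp [hold])]
  rw [pvReplace_go_spec old new hold _ _ _ (by omega)]
  simp

-- == structure of pvSplitRec ==

lemma pvSplitRec_head (sep s : List Char) (hsep : sep ≠ []) :
    (pvSplitRec sep s).headD [] = pvTakeUntilSub sep s := by
  induction s with
  | nil => rw [pvSplitRec]; simp [hsep, pvTakeUntilSub]
  | cons c t ih =>
    rw [pvSplitRec]
    by_cases hp : sep.isPrefixOf (c :: t)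
    · rw [dif_pos ⟨hsep, hp, by simp⟩]
      simp [pvTakeUntilSub, hp]
    · rw [dif_neg (by simp [hp])]
      cases hrec : pvSplitRec sep t with
      | nil => exact absurd hrec (pvSplitRec_ne_nil' _ _)
      | cons hh rr =>
        rw [hrec] at ih
        simp only [List.headD_cons] at ih
        simp [pvConsHead, pvTakeUntilSub, hp, hrec, ih]

-- decomposition at the first occurrence (j given by find_spec)
lemma pvSplitRec_first (sep : List Char) (hsep : sep ≠ []) :
    ∀ (j : Nat) (s : List Char), sep <+: s.drop j → (∀ i < j, ¬ sep <+: s.drop i) →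
      pvSplitRec sep s = s.take j :: pvSplitRec sep (s.drop (j + sep.length)) := by
  intro j
  induction j with
  | zero =>
    intro s h1 h2
    simp only [List.drop_zero] at h1
    have hs : s ≠ [] := by
      intro e; subst e; exact hsep (List.prefix_nil.mp h1)
    rw [pvSplitRec, dif_pos ⟨hsep, List.isPrefixOf_iff_prefix.mpr h1, hs⟩]
    simp
  | succ k ih =>
    intro s h1 h2
    have h0 : ¬ sep <+: s := by simpa using h2 0 (Nat.succ_pos k)
    cases s with
    | nil => exact absurd (List.prefix_nil.mp (by simpa using h1)) hsep
    | cons c t =>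
      rw [pvSplitRec, dif_neg (fun hcond => h0 (List.isPrefixOf_iff_prefix.mp hcond.2.1))]
      have hrec := ih t (by simpa using h1) (fun i hi => by simpa using h2 (i + 1) (by omega))
      have harith : k + 1 + sep.length = (k + sep.length) + 1 := by omega
      rw [harith]
      simp [pvConsHead, hrec]

lemma pvCountRec_first (sep : List Char) (hsep : sep ≠ []) :
    ∀ (j : Nat) (s : List Char), sep <+: s.drop j → (∀ i < j, ¬ sep <+: s.drop i) →
      pvCountRec sep s = pvCountRec sep (s.drop (j + sep.length)) + 1 := by
  intro j
  induction j with
  | zero =>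
    intro s h1 h2
    simp only [List.drop_zero] at h1
    have hs : s ≠ [] := by
      intro e; subst e; exact hsep (List.prefix_nil.mp h1)
    rw [pvCountRec, dif_pos ⟨hsep, List.isPrefixOf_iff_prefix.mpr h1, hs⟩]
    simp
  | succ k ih =>
    intro s h1 h2
    have h0 : ¬ sep <+: s := by simpa using h2 0 (Nat.succ_pos k)
    cases s with
    | nil => exact absurd (List.prefix_nil.mp (by simpa using h1)) hsep
    | cons c t =>
      rw [pvCountRec, dif_neg (fun hcond => h0 (List.isPrefixOf_iff_prefix.mp hcond.2.1))]
      have hrec := ih t (by simpa using h1) (fun i hi => by simpa using h2 (i + 1) (by omega))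
      have harith : k + 1 + sep.length = (k + sep.length) + 1 := by omega
      rw [harith]
      simp [hrec]

lemma pvCountRec_zero (sep s : List Char) (h : pvCountRec sep s = 0) :
    pvSplitRec sep s = [s] := by
  fun_induction pvCountRec sep s
  case case1 => omega
  case case2 => rw [pvSplitRec]; simp_all
  case case3 =>
    rename_i c t hcond ih
    rw [pvSplitRec, dif_neg hcond]
    simp [pvConsHead, ih h]

-- == takeWhile facts ==

lemma pvTakeUntilSub_single (ch : Char) (s : List Char) :
    pvTakeUntilSub [ch] s = s.takeWhile (fun c => c ≠ ch) := by
  induction s with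
  | nil => simp [pvTakeUntilSub]
  | cons c t ih =>
    by_cases hc : c = ch
    · subst hc
      simp [pvTakeUntilSub, List.isPrefixOf]
    · simp [pvTakeUntilSub, List.isPrefixOf, hc, Ne.symm hc, ih]

lemma pvTakeUntil_eq_takeWhile (stops : List Char) (s : List Char) :
    pvTakeUntil stops s = s.takeWhile (fun c => ¬ (c ∈ stops) : Char → Bool) := by
  induction s with
  | nil => simp [pvTakeUntil]
  | cons c t ih =>
    by_cases hc : c ∈ stops
    · simp [pvTakeUntil, hc]
    · simp [pvTakeUntil, hc, ih]

-- dropping the text after the next occurrence of sep does not change a takeWhile that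
-- already stops at sep's first character
lemma pvTakeWhile_takeUntilSub (sep : List Char) (c0 : Char) (p' : List Char)
    (hsep : sep = c0 :: p') (q : Char → Bool) (hq : q c0 = false) (s : List Char) :
    (pvTakeUntilSub sep s).takeWhile q = s.takeWhile q := by
  induction s with
  | nil => simp [pvTakeUntilSub]
  | cons c t ih =>
    by_cases hp : sep.isPrefixOf (c :: t)
    · have hc : c = c0 := by
        subst hsep
        rcases List.isPrefixOf_iff_prefix.mp hp with ⟨w, hw⟩
        rw [List.cons_append] at hw
        exact (List.cons_eq_cons.mp hw).1.symm
      subst hc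
      simp [pvTakeUntilSub, hp, hq]
    · by_cases hqc : q c
      · simp [pvTakeUntilSub, hp, hqc, ih]
      · simp [pvTakeUntilSub, hp, hqc]

-- == the replace chain is B's single scan ==

def pvDash (c : Char) : Char := if c = '-' then ':' else c

lemma pvRepRec_nil (old new : List Char) : pvRepRec old new [] = [] := by
  rw [pvRepRec]; simp

lemma pvRepRec_cons_neg (old new : List Char) (c : Char) (t : List Char)
    (h : ¬ old.isPrefixOf (c :: t)) :
    pvRepRec old new (c :: t) = c :: pvRepRec old new t := by
  rw [pvRepRec, dif_neg (by simp [h])]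

lemma pvRepRec_cons_pos (old new : List Char) (s : List Char) (hold : old ≠ [])
    (hs : s ≠ []) (h : old.isPrefixOf s) :
    pvRepRec old new s = new ++ pvRepRec old new (s.drop old.length) := by
  rw [pvRepRec, dif_pos ⟨hold, h, hs⟩]

lemma pvTake3_shape (c : Char) (t : List Char) (x y z : Char)
    (h : (c :: t).take 3 = [x, y, z]) : ∃ r, c = x ∧ t = y :: z :: r := by
  cases t with
  | nil => simp at h
  | cons d u =>
    cases u with
    | nil => simp at h
    | cons e v =>
      simp [List.take_succ_cons] at h
      exact ⟨v, h.1, by simp [h.2.1, h.2.2]⟩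

lemma pvMapDash_head (t : List Char) (a : Char) (ha : a ≠ ':') (ha' : a ≠ '-') :
    ((t.map pvDash).head? = some a) ↔ (t.head? = some a) := by
  cases t with
  | nil => simp
  | cons c u =>
    by_cases hc : c = '-'
    · subst hc; simp [pvDash, Ne.symm ha, Ne.symm ha']
    · simp [pvDash, hc]

lemma pvRepRec_dash (s : List Char) : pvRepRec ['-'] [':'] s = s.map pvDash := by
  induction s with
  | nil => simp [pvRepRec_nil]
  | cons c t ih =>
    by_cases hc : c = '-'
    · subst hc
      rw [pvRepRec_cons_pos _ _ _ (by simp) (by simp) (by simp [List.isPrefixOf])]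
      simp [pvDash, ih]
    · rw [pvRepRec_cons_neg _ _ _ _ (by simp [List.isPrefixOf, Ne.symm hc])]
      simp [pvDash, hc, ih]

lemma pvPrefix_map_pvDash (pat : List Char) (hpat : ∀ x ∈ pat, x ≠ ':' ∧ x ≠ '-') :
    ∀ s : List Char, pat.isPrefixOf (s.map pvDash) = pat.isPrefixOf s := by
  induction pat with
  | nil => intro s; simp [List.isPrefixOf]
  | cons x pr ih =>
    intro s
    have hx := hpat x (by simp)
    cases s with
    | nil => simp
    | cons c t =>
      by_cases hc : c = '-'
      · subst hc
        have h1 : (x == ':') = false := beq_eq_false_iff_ne.mpr hx.1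
        have h2 : (x == '-') = false := beq_eq_false_iff_ne.mpr hx.2
        simp [List.isPrefixOf, pvDash, h1, h2]
      · simp [List.isPrefixOf, pvDash, hc,
          ih (fun y hy => hpat y (List.mem_cons_of_mem _ hy)) t]

lemma pvRep2_head (z : List Char) (a : Char) (ha : a ≠ ':') (ha' : a ≠ '%') :
    (pvRepRec ['%', '3', 'A'] [':'] z).head? = some a ↔ z.head? = some a := by
  cases z with
  | nil => simp [pvRepRec_nil]
  | cons c t =>
    by_cases hp : List.isPrefixOf ['%', '3', 'A'] (c :: t)
    · have hc : c = '%' := by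
        simp [List.isPrefixOf] at hp
        exact hp.1.symm
      rw [pvRepRec_cons_pos _ _ _ (by simp) (by simp) hp]
      simp [hc, Ne.symm ha, Ne.symm ha']
    · rw [pvRepRec_cons_neg _ _ _ _ hp]
      simp

lemma pvChainAux : ∀ (n : Nat) (s : List Char), s.length ≤ n →
    pvRepRec ['%', '3', 'a'] [':'] (pvRepRec ['%', '3', 'A'] [':'] (s.map pvDash)) = pvScan s := by
  intro n
  induction n with
  | zero =>
    intro s h
    have hs : s = [] := List.length_eq_zero_iff.mp (Nat.le_zero.mp h)
    subst hs
    rw [pvScan]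
    simp [pvRepRec_nil]
  | succ n ih =>
    intro s h
    cases s with
    | nil => rw [pvScan]; simp [pvRepRec_nil]
    | cons c t =>
      simp only [List.length_cons] at h
      rw [pvScan]
      by_cases hdash : c = '-'
      · subst hdash
        rw [if_pos rfl]
        simp only [List.map_cons, show pvDash '-' = ':' from by decide]
        rw [pvRepRec_cons_neg _ _ _ _ (by simp [List.isPrefixOf])]
        rw [pvRepRec_cons_neg _ _ _ _ (by simp [List.isPrefixOf])]
        rw [ih t (by omega)]
      · rw [if_neg hdash]
        by_cases h3A : (c :: t).take 3 = ['%', '3', 'A']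
        · rw [if_pos (Or.inl h3A)]
          obtain ⟨r, hc, ht⟩ := pvTake3_shape c t _ _ _ h3A
          subst hc; subst ht
          simp only [List.map_cons]
          have e1 : pvDash '%' = '%' := by decide
          have e2 : pvDash '3' = '3' := by decide
          have e3 : pvDash 'A' = 'A' := by decide
          rw [e1, e2, e3]
          have hrep2 : pvRepRec ['%', '3', 'A'] [':'] ('%' :: '3' :: 'A' :: List.map pvDash r)
              = ':' :: pvRepRec ['%', '3', 'A'] [':'] (List.map pvDash r) := by
            rw [pvRepRec_cons_pos _ _ _ (by simp) (by simp) (by simp [List.isPrefixOf])]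
            simp
          rw [hrep2]
          rw [pvRepRec_cons_neg _ _ _ _ (by simp [List.isPrefixOf])]
          rw [ih r (by simp at h ⊢; omega)]
          simp [List.drop_succ_cons]
        · by_cases h3a : (c :: t).take 3 = ['%', '3', 'a']
          · rw [if_pos (Or.inr h3a)]
            obtain ⟨r, hc, ht⟩ := pvTake3_shape c t _ _ _ h3a
            subst hc; subst ht
            simp only [List.map_cons]
            have e1 : pvDash '%' = '%' := by decide
            have e2 : pvDash '3' = '3' := by decide
            have e3 : pvDash 'a' = 'a' := by decide
            rw [e1, e2, e3]
            have hrep2 : pvRepRec ['%', '3', 'A'] [':'] ('%' :: '3' :: 'a' :: List.map pvDash r)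
                = '%' :: '3' :: 'a' :: pvRepRec ['%', '3', 'A'] [':'] (List.map pvDash r) := by
              rw [pvRepRec_cons_neg _ _ _ _ (by simp [List.isPrefixOf])]
              rw [pvRepRec_cons_neg _ _ _ _ (by simp [List.isPrefixOf])]
              rw [pvRepRec_cons_neg _ _ _ _ (by simp [List.isPrefixOf])]
            rw [hrep2]
            rw [pvRepRec_cons_pos _ _ _ (by simp) (by simp) (by simp [List.isPrefixOf])]
            rw [show (('%' :: '3' :: 'a' :: pvRepRec ['%', '3', 'A'] [':'] (List.map pvDash r)).drop
                (['%', '3', 'a'] : List Char).length)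
                = pvRepRec ['%', '3', 'A'] [':'] (List.map pvDash r) from by simp]
            rw [ih r (by simp at h ⊢; omega)]
            simp [List.drop_succ_cons]
          · rw [if_neg (not_or.mpr ⟨h3A, h3a⟩)]
            simp only [List.map_cons]
            have ec : pvDash c = c := by simp [pvDash, hdash]
            rw [ec]
            have hnp2 : ¬ List.isPrefixOf ['%', '3', 'A'] (c :: List.map pvDash t) := by
              have := pvPrefix_map_pvDash ['%', '3', 'A']
                (by intro x hx; fin_cases hx <;> exact ⟨by decide, by decide⟩) (c :: t)
              simp only [List.map_cons, ec] at this
              rw [this]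
              intro hp
              exact h3A ((List.prefix_iff_eq_take.mp (List.isPrefixOf_iff_prefix.mp hp)).symm)
            rw [pvRepRec_cons_neg _ _ _ _ hnp2]
            have hnp3 : ¬ List.isPrefixOf ['%', '3', 'a']
                (c :: pvRepRec ['%', '3', 'A'] [':'] (List.map pvDash t)) := by
              intro hp
              simp only [List.isPrefixOf, Bool.and_eq_true, beq_iff_eq] at hp
              obtain ⟨hc, hp2⟩ := hp
              -- the rest of rep2's output starts "3a" only if t itself starts "3a"
              have h3head : (pvRepRec ['%', '3', 'A'] [':'] (List.map pvDash t)).head? = some '3' := by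
                cases hz : pvRepRec ['%', '3', 'A'] [':'] (List.map pvDash t) with
                | nil => rw [hz] at hp2; simp [List.isPrefixOf] at hp2
                | cons z1 z2 =>
                  rw [hz] at hp2
                  simp only [List.isPrefixOf, Bool.and_eq_true, beq_iff_eq] at hp2
                  simp [hp2.1.symm]
              have ht3 : t.head? = some '3' := by
                have := (pvRep2_head (List.map pvDash t) '3' (by decide) (by decide)).mp h3head
                exact (pvMapDash_head t '3' (by decide) (by decide)).mp this
              obtain ⟨u, htu⟩ : ∃ u, t = '3' :: u := by
                cases t with
                | nil => simp at ht3
                | cons a b => simp at ht3; exact ⟨b, by simp [ht3]⟩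
              subst htu
              simp only [List.map_cons, show pvDash '3' = '3' from by decide] at hp2
              rw [pvRepRec_cons_neg _ _ _ _ (by simp [List.isPrefixOf])] at hp2
              simp only [List.isPrefixOf, Bool.and_eq_true, beq_iff_eq] at hp2
              obtain ⟨-, hp3⟩ := hp2
              have hahead : (pvRepRec ['%', '3', 'A'] [':'] (List.map pvDash u)).head? = some 'a' := by
                cases hz : pvRepRec ['%', '3', 'A'] [':'] (List.map pvDash u) with
                | nil => rw [hz] at hp3; simp [List.isPrefixOf] at hp3
                | cons z1 z2 =>
                  rw [hz] at hp3
                  simp only [List.isPrefixOf, Bool.and_eq_true, beq_iff_eq] at hp3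
                  simp [hp3.1.symm]
              have hua : u.head? = some 'a' := by
                have := (pvRep2_head (List.map pvDash u) 'a' (by decide) (by decide)).mp hahead
                exact (pvMapDash_head u 'a' (by decide) (by decide)).mp this
              obtain ⟨v, huv⟩ : ∃ v, u = 'a' :: v := by
                cases u with
                | nil => simp at hua
                | cons a b => simp at hua; exact ⟨b, by simp [hua]⟩
              subst huv
              subst hc
              simp at h3a
            rw [pvRepRec_cons_neg _ _ _ _ hnp3]
            rw [ih t (by omega)]

lemma pvChain (s : List Char) :
    pvRepRec ['%', '3', 'a'] [':'] (pvRepRec ['%', '3', 'A'] [':'] (s.map pvDash)) = pvScan s := by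
  exact pvChainAux s.length s le_rfl

-- == assembly ==

lemma pvGetD_toList (L : List String) (i : Nat) :
    (L.getD i "").toList = (L.map String.toList).getD i [] := by
  cases h : L[i]? with
  | none => simp [List.getD_eq_getElem?_getD, h, List.getElem?_map]
  | some x => simp [List.getD_eq_getElem?_getD, h, List.getElem?_map]

lemma pvSplitIdx_toList (s sep : String) (i : Nat) (hsep : sep.toList ≠ []) :
    (pvSplitIdx s sep i).toList = (pvSplitRec sep.toList s.toList).getD i [] := by
  unfold pvSplitIdx
  have h := PySem.Str.split?_map s sep
  rw [PySem.Chars.split?, if_neg (by simp [hsep])] at h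
  cases hL : PySem.Str.split? s sep with
  | none => rw [hL] at h; simp at h
  | some L =>
    rw [hL] at h
    simp only [Option.map_some, Option.some.injEq] at h
    simp only [Option.getD_some]
    rw [pvGetD_toList, h, pvSplitOn_eq sep.toList s.toList hsep]

-- B's take_until as a takeWhile, with the two-character stop set
lemma pvTakeWhile_ext (p q : Char → Bool) (h : ∀ c, p c = q c) (s : List Char) :
    s.takeWhile p = s.takeWhile q := by
  rw [show p = q from funext h]

lemma pvTakeUntil_two (a b : Char) (s : List Char) :
    pvTakeUntil [a, b] s = s.takeWhile (fun c => !(c = a || c = b)) := by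
  rw [pvTakeUntil_eq_takeWhile]
  apply pvTakeWhile_ext
  intro c
  by_cases hca : c = a <;> by_cases hcb : c = b <;> simp [hca, hcb]

-- the file-key chain of A equals B's single take_until on the raw tail
lemma pvFileKey_chars (p s : List Char) (p' : List Char) (hp0 : p = '/' :: p')
    (hin : p <:+: s) :
    List.takeWhile (fun c => decide (c ≠ '?'))
        (List.takeWhile (fun c => decide (c ≠ '/')) ((pvSplitRec p s).getD 1 []))
      = pvTakeUntil ['/', '?'] (s.drop ((PySem.Chars.find s p).toNat + p.length)) := by
  have hp : p ≠ [] := by simp [hp0]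
  have hfind : 0 ≤ PySem.Chars.find s p := (PySem.Chars.find_nonneg_iff s p).mpr hin
  obtain ⟨h1, h2⟩ := PySem.Chars.find_spec hfind
  rw [pvSplitRec_first p hp ((PySem.Chars.find s p).toNat) s h1 h2]
  simp only [List.getD_eq_getElem?_getD, List.getElem?_cons_succ]
  have hhead : ((pvSplitRec p (s.drop ((PySem.Chars.find s p).toNat + p.length)))[0]?).getD []
      = pvTakeUntilSub p (s.drop ((PySem.Chars.find s p).toNat + p.length)) := by
    rw [← pvSplitRec_head p _ hp]
    cases hrec : pvSplitRec p (s.drop ((PySem.Chars.find s p).toNat + p.length)) with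
    | nil => exact absurd hrec (pvSplitRec_ne_nil' _ _)
    | cons hh rr => simp
  rw [hhead]
  rw [List.takeWhile_takeWhile]
  rw [pvTakeWhile_takeUntilSub p '/' p' hp0 _ (by decide)]
  rw [pvTakeUntil_two]
  apply pvTakeWhile_ext
  intro c
  by_cases hca : c = '/' <;> by_cases hcb : c = '?' <;> simp [hca, hcb]

-- the node-id raw segment of A equals B's take_until on the raw tail (needs Pre_)
lemma pvNode_chars (m s : List Char) (hm : m ≠ [])
    (hin : m <:+: s) (hcnt : pvCountRec m s ≤ 1) :
    List.takeWhile (fun c => decide (c ≠ '&')) ((pvSplitRec m s).getD 1 [])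
      = pvTakeUntil ['&'] (s.drop ((PySem.Chars.find s m).toNat + m.length)) := by
  have hfind : 0 ≤ PySem.Chars.find s m := (PySem.Chars.find_nonneg_iff s m).mpr hin
  obtain ⟨h1, h2⟩ := PySem.Chars.find_spec hfind
  rw [pvSplitRec_first m hm ((PySem.Chars.find s m).toNat) s h1 h2]
  have hc1 := pvCountRec_first m hm ((PySem.Chars.find s m).toNat) s h1 h2
  have hc0 : pvCountRec m (s.drop ((PySem.Chars.find s m).toNat + m.length)) = 0 := by omega
  rw [pvCountRec_zero m _ hc0]
  simp only [List.getD_eq_getElem?_getD, List.getElem?_cons_succ, List.getElem?_cons_zero,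
    Option.getD_some]
  rw [pvTakeUntil_eq_takeWhile]
  apply pvTakeWhile_ext
  intro c
  by_cases hca : c = '&' <;> simp [hca]

lemma pvSplitRec_getD0 (sep s : List Char) (hsep : sep ≠ []) :
    (pvSplitRec sep s).getD 0 [] = pvTakeUntilSub sep s := by
  rw [← pvSplitRec_head sep s hsep]
  cases hrec : pvSplitRec sep s with
  | nil => exact absurd hrec (pvSplitRec_ne_nil' _ _)
  | cons hh rr => simp [List.getD_eq_getElem?_getD]

lemma pvStrInfix (url p : String) (hin : PySem.Str.isIn p url = true) :
    p.toList <:+: url.toList :=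
  (PySem.Chars.isIn_iff_infix _ _).mp (by simpa [PySem.Str.isIn] using hin)

lemma pvFindNonneg (url p : String) (hin : PySem.Str.isIn p url = true) :
    0 ≤ PySem.Str.find url p := by
  simpa [PySem.Str.find] using
    (PySem.Chars.find_nonneg_iff url.toList p.toList).mpr (pvStrInfix url p hin)

lemma pvTailAfter_some (url p : String) (hin : PySem.Str.isIn p url = true) :
    pvTailAfter url p
      = some (PySem.Str.slice url (some (PySem.Str.find url p + PySem.Str.len p)) none) := by
  have hf := pvFindNonneg url p hin
  unfold pvTailAfter
  rw [if_neg (by omega)]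

lemma pvTailAfter_none (url p : String) (hnin : PySem.Str.isIn p url = false) :
    pvTailAfter url p = none := by
  have : PySem.Chars.find url.toList p.toList = -1 :=
    (PySem.Chars.find_eq_neg_one_iff _ _).mpr
      ((PySem.Chars.isIn_eq_false_iff _ _).mp (by simpa [PySem.Str.isIn] using hnin))
  unfold pvTailAfter
  rw [if_pos (by simp [PySem.Str.find, this])]

lemma pvTail_toList (url p : String) (hin : PySem.Str.isIn p url = true) :
    (PySem.Str.slice url (some (PySem.Str.find url p + PySem.Str.len p)) none).toList
      = url.toList.drop ((PySem.Chars.find url.toList p.toList).toNat + p.toList.length) := by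
  have hf := pvFindNonneg url p hin
  rw [PySem.Str.toList_slice, PySem.Chars.slice_eq_listSlice,
    PySem.List.slice_from _ (by simp [PySem.Str.len] at hf ⊢; omega)]
  congr 1
  simp only [PySem.Str.find, PySem.Str.len] at hf ⊢
  omega

lemma pvKeyMarker (url p : String) (p' : List Char) (hp0 : p.toList = '/' :: p')
    (hin : PySem.Str.isIn p url = true) :
    pvSplitIdx (pvSplitIdx (pvSplitIdx url p 1) "/" 0) "?" 0
      = String.ofList (pvTakeUntil ['/', '?']
          (PySem.Str.slice url (some (PySem.Str.find url p + PySem.Str.len p)) none).toList) := by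
  apply String.toList_inj.mp
  rw [String.toList_ofList]
  rw [pvSplitIdx_toList _ "?" 0 (by decide), pvSplitRec_getD0 _ _ (by decide)]
  rw [show ("?" : String).toList = ['?'] from by decide, pvTakeUntilSub_single]
  rw [pvSplitIdx_toList _ "/" 0 (by decide), pvSplitRec_getD0 _ _ (by decide)]
  rw [show ("/" : String).toList = ['/'] from by decide, pvTakeUntilSub_single]
  rw [pvSplitIdx_toList url p 1 (by simp [hp0])]
  rw [pvTail_toList url p hin]
  exact pvFileKey_chars p.toList url.toList p' hp0 (pvStrInfix url p hin)

lemma pvNodeMarker (url : String) (hin : PySem.Str.isIn "node-id=" url = true)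
    (hpre : Pre_parse_figma_url url) :
    PySem.Str.replace (PySem.Str.replace (PySem.Str.replace
        (pvSplitIdx (pvSplitIdx url "node-id=" 1) "&" 0) "-" ":") "%3A" ":") "%3a" ":"
      = String.ofList (pvScan (pvTakeUntil ['&']
          (PySem.Str.slice url (some (PySem.Str.find url "node-id=" + PySem.Str.len "node-id=")) none).toList)) := by
  apply String.toList_inj.mp
  rw [String.toList_ofList]
  rw [PySem.Str.toList_replace, PySem.Str.toList_replace, PySem.Str.toList_replace]
  rw [show ("%3a" : String).toList = ['%', '3', 'a'] from by decide]
  rw [show ("%3A" : String).toList = ['%', '3', 'A'] from by decide]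
  rw [show ("-" : String).toList = ['-'] from by decide]
  rw [show (":" : String).toList = [':'] from by decide]
  rw [pvReplace_eq _ _ _ (by simp), pvReplace_eq _ _ _ (by simp), pvReplace_eq _ _ _ (by simp)]
  rw [pvRepRec_dash]
  rw [pvSplitIdx_toList _ "&" 0 (by decide), pvSplitRec_getD0 _ _ (by decide)]
  rw [show ("&" : String).toList = ['&'] from by decide, pvTakeUntilSub_single]
  rw [pvSplitIdx_toList url "node-id=" 1 (by decide)]
  rw [pvTail_toList url "node-id=" hin]
  have hcnt : pvCountRec ("node-id=").toList url.toList ≤ 1 := by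
    have := hpre
    unfold Pre_parse_figma_url at this
    rwa [PySem.Str.count, pvCount_eq _ _ (by decide)] at this
  rw [pvNode_chars ("node-id=").toList url.toList (by decide)
    (pvStrInfix url "node-id=" hin) hcnt]
  rw [pvChain]

theorem pvMain (url : String) (hpre : Pre_parse_figma_url url) :
    parse_figma_url url = parse_figma_url_alt url := by
  unfold parse_figma_url parse_figma_url_alt
  by_cases hd : PySem.Str.isIn "/design/" url
  · rw [pvTailAfter_some url "/design/" hd]
    simp only [pvFileKeyLoop, if_pos hd]
    rw [pvKeyMarker url "/design/" ("design/".toList) (by decide) hd]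
    by_cases hn : PySem.Str.isIn "node-id=" url
    · rw [if_pos hn, pvTailAfter_some url "node-id=" hn,
        pvNodeMarker url hn hpre]
    · rw [if_neg hn, pvTailAfter_none url "node-id=" (by simpa using hn)]
  · rw [pvTailAfter_none url "/design/" (by simpa using hd)]
    simp only [pvFileKeyLoop, if_neg hd]
    by_cases hf : PySem.Str.isIn "/file/" url
    · rw [if_pos hf, pvTailAfter_some url "/file/" hf]
      rw [pvKeyMarker url "/file/" ("file/".toList) (by decide) hf]
      by_cases hn : PySem.Str.isIn "node-id=" url
      · rw [if_pos hn, pvTailAfter_some url "node-id=" hn,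
          pvNodeMarker url hn hpre]
      · rw [if_neg hn, pvTailAfter_none url "node-id=" (by simpa using hn)]
    · rw [if_neg hf, pvTailAfter_none url "/file/" (by simpa using hf)]
      by_cases hn : PySem.Str.isIn "node-id=" url
      · rw [if_pos hn, pvTailAfter_some url "node-id=" hn,
          pvNodeMarker url hn hpre]
      · rw [if_neg hn, pvTailAfter_none url "node-id=" (by simpa using hn)]

-- ===== VERDICT (by name: the statement is the Claim_ definition above) =====
theorem parse_figma_url_spec : Claim_equal_parse_figma_url := by
  intro url _ hpre
  unfold Spec_parse_figma_url
  exact pvMain url hpre
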